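-- pv_equiv track=rewrite | github.com/MystenLabs/fastcrypto | fastcrypto-tbls/src/weight-reduction/scripts/create_stakes_tickets_csv.py | create_ticket_assignment
-- ===== SOURCE A (Python) =====
-- def create_ticket_assignment(ticket_distribution, num_validators):
--     """
--     Create the actual ticket assignment for each validator.
--     """
--     tickets = [0] * num_validators
--
--     current_validator = 0
--     for ticket_count, num_validators_with_tickets in ticket_distribution:
--         for _ in range(num_validators_with_tickets):
--             if current_validator < num_validators:
--                 tickets[current_validator] = ticket_count
--                 current_validator += 1
--
--     return tickets
-- ===== SOURCE B (Python) =====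
-- def create_ticket_assignment(ticket_distribution, num_validators):
--     """
--     Create the actual ticket assignment for each validator.
--     """
--     result = []
--     for ticket_count, num_validators_with_tickets in ticket_distribution:
--         result += [ticket_count] * num_validators_with_tickets
--     m = max(num_validators, 0)
--     return result[:m] + [0] * (m - len(result))
-- ===== Notes on version B (the rewrite author's own statement) =====
-- stated objective: simpler
-- what changed: B builds the full concatenated ticket sequence in one extend-loop and then truncates/pads it to the validator count in a single slice+pad step, instead of A's preallocated array with a per-element current_validator bound check and in-place indexed writes.
import Mathlib
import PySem

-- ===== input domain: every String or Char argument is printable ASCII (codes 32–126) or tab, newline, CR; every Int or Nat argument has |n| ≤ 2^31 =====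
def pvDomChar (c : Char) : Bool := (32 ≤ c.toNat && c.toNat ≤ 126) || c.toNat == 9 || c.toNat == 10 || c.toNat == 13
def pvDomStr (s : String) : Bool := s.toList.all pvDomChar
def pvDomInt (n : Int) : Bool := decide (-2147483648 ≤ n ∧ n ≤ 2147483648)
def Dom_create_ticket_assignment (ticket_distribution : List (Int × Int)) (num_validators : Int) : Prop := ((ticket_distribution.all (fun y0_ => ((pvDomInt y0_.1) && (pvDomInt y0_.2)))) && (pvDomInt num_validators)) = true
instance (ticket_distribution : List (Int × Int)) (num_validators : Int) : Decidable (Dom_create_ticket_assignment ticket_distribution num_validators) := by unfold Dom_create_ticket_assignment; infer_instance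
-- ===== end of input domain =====

-- B builds the whole concatenated ticket sequence first and then truncates/pads it to the
-- validator count in one slice+pad step, replacing A's preallocated array with per-element
-- bound-checked indexed writes; objective: simpler.

-- ===== PORT A =====
def create_ticket_assignment (ticket_distribution : List (Int × Int)) (num_validators : Int) : List Int :=
  let tickets : List Int := List.replicate num_validators.toNat 0
  let st := ticket_distribution.foldl
    (fun (st : List Int × Int) (p : Int × Int) =>
      (List.range p.2.toNat).foldl
        (fun (st : List Int × Int) _ =>
          if st.2 < num_validators then (st.1.set st.2.toNat p.1, st.2 + 1) else st)
        st)
    (tickets, 0)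
  st.1

-- ===== PORT B =====
def create_ticket_assignment_alt (ticket_distribution : List (Int × Int)) (num_validators : Int) : List Int :=
  let result : List Int := ticket_distribution.foldl
    (fun (acc : List Int) (p : Int × Int) => acc ++ List.replicate p.2.toNat p.1) []
  let m : Int := max num_validators 0
  PySem.List.slice result none (some m) ++ List.replicate (m.toNat - result.length) 0

-- ===== PRECONDITION & SPEC =====
def Spec_create_ticket_assignment (ticket_distribution : List (Int × Int)) (num_validators : Int) (out : List Int) : Prop := out = create_ticket_assignment_alt ticket_distribution num_validators
instance (ticket_distribution : List (Int × Int)) (num_validators : Int) (out : List Int) : Decidable (Spec_create_ticket_assignment ticket_distribution num_validators out) := by unfold Spec_create_ticket_assignment; infer_instance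

-- ===== CLAIM (what is proved, stated in full; the proofs are below) =====
def Claim_equal_create_ticket_assignment : Prop := ∀ (ticket_distribution : List (Int × Int)) (num_validators : Int), Dom_create_ticket_assignment ticket_distribution num_validators → Spec_create_ticket_assignment ticket_distribution num_validators (create_ticket_assignment ticket_distribution num_validators)

-- ===== LEMMAS AND PROOFS =====

/-- The invariant state of A's loop after the sequence `F` of tickets has been handed out. -/
def pvStateOf (num_validators : Int) (F : List Int) : List Int × Int :=
  (F.take num_validators.toNat ++ List.replicate (num_validators.toNat - F.length) 0,
   ((min F.length num_validators.toNat : Nat) : Int))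

theorem pvCond_iff (num_validators : Int) (F : List Int) :
    (((min F.length num_validators.toNat : Nat) : Int) < num_validators) ↔
      F.length < num_validators.toNat := by
  omega

theorem pvStep (num_validators : Int) (F : List Int) (c : Int)
    (h : F.length < num_validators.toNat) :
    ((pvStateOf num_validators F).1.set (pvStateOf num_validators F).2.toNat c,
      (pvStateOf num_validators F).2 + 1) = pvStateOf num_validators (F ++ [c]) := by
  unfold pvStateOf
  have hmin : min F.length num_validators.toNat = F.length := by omega
  have htake : F.take num_validators.toNat = F := List.take_of_length_le (by omega)
  have hrep : num_validators.toNat - F.length = (num_validators.toNat - F.length - 1) + 1 := by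
    omega
  refine Prod.ext ?_ ?_
  · simp only [hmin, htake, Int.toNat_natCast]
    rw [List.take_of_length_le (l := F ++ [c])
      (by simp only [List.length_append, List.length_cons, List.length_nil]; omega)]
    rw [hrep, List.replicate_succ, List.set_append_right _ _ (le_refl _)]
    simp [List.append_assoc, Nat.sub_sub]
  · simp only [hmin]
    have h2 : min (F ++ [c]).length num_validators.toNat = F.length + 1 := by
      simp only [List.length_append, List.length_cons, List.length_nil]
      omega
    rw [h2]
    push_cast
    ring

theorem pvStepNoop (num_validators : Int) (F : List Int) (c : Int)
    (h : ¬ F.length < num_validators.toNat) :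
    pvStateOf num_validators F = pvStateOf num_validators (F ++ [c]) := by
  unfold pvStateOf
  refine Prod.ext ?_ ?_
  · rw [List.take_append_of_le_length (by omega)]
    simp
    omega
  · simp
    omega

theorem pvIfStep (num_validators : Int) (F : List Int) (c : Int) :
    (if (pvStateOf num_validators F).2 < num_validators then
        ((pvStateOf num_validators F).1.set (pvStateOf num_validators F).2.toNat c,
          (pvStateOf num_validators F).2 + 1)
      else pvStateOf num_validators F) = pvStateOf num_validators (F ++ [c]) := by
  show (if ((min F.length num_validators.toNat : Nat) : Int) < num_validators then _ else _) = _
  by_cases h : F.length < num_validators.toNat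
  · rw [if_pos ((pvCond_iff num_validators F).mpr h)]
    exact pvStep num_validators F c h
  · rw [if_neg (fun hc => h ((pvCond_iff num_validators F).mp hc))]
    exact pvStepNoop num_validators F c h

theorem pvInner (num_validators : Int) (c : Int) (k : Nat) (F : List Int) :
    (List.range k).foldl
        (fun (st : List Int × Int) _ =>
          if st.2 < num_validators then (st.1.set st.2.toNat c, st.2 + 1) else st)
        (pvStateOf num_validators F)
      = pvStateOf num_validators (F ++ List.replicate k c) := by
  induction k generalizing F with
  | zero => simp
  | succ k ih =>
    rw [List.range_succ, List.foldl_append, ih]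
    simp only [List.foldl_cons, List.foldl_nil]
    rw [pvIfStep, List.append_assoc, ← List.replicate_succ' (n := k)]

/-- The flat ticket sequence described by a distribution. -/
def pvFlat (dist : List (Int × Int)) : List Int :=
  dist.flatMap (fun p => List.replicate p.2.toNat p.1)

theorem pvOuter (num_validators : Int) (dist : List (Int × Int)) (F : List Int) :
    dist.foldl
        (fun (st : List Int × Int) (p : Int × Int) =>
          (List.range p.2.toNat).foldl
            (fun (st : List Int × Int) _ =>
              if st.2 < num_validators then (st.1.set st.2.toNat p.1, st.2 + 1) else st)
            st)
        (pvStateOf num_validators F)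
      = pvStateOf num_validators (F ++ pvFlat dist) := by
  induction dist generalizing F with
  | nil => simp [pvFlat]
  | cons p dist ih =>
    simp only [List.foldl_cons]
    rw [pvInner, ih]
    simp only [pvFlat, List.flatMap_cons, List.append_assoc]

theorem pvFoldAppend (dist : List (Int × Int)) (acc : List Int) :
    dist.foldl (fun (acc : List Int) (p : Int × Int) =>
        acc ++ List.replicate p.2.toNat p.1) acc
      = acc ++ pvFlat dist := by
  induction dist generalizing acc with
  | nil => simp [pvFlat]
  | cons p dist ih =>
    simp only [List.foldl_cons, ih, pvFlat, List.flatMap_cons, List.append_assoc]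

-- ===== VERDICT (by name: the statement is the Claim_ definition above) =====
theorem create_ticket_assignment_spec : Claim_equal_create_ticket_assignment := by
  intro dist n _
  unfold Spec_create_ticket_assignment
  dsimp only [create_ticket_assignment, create_ticket_assignment_alt]
  have hinit : (List.replicate n.toNat (0 : Int), (0 : Int)) = pvStateOf n [] := by
    simp [pvStateOf]
  rw [hinit, pvOuter, pvFoldAppend]
  rw [PySem.List.slice_to _ (le_max_right n 0)]
  have hmt : (max n 0).toNat = n.toNat := by omega
  rw [hmt]
  simp [pvStateOf]
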